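-- pv_equiv track=rewrite | github.com/vamseeachanta/workspace-hub | scripts/data/doc_intelligence/query.py | format_stage2_brief
-- ===== SOURCE A (Python) =====
-- from collections import Counter
-- from typing import List, Optional
--
-- def format_stage2_brief(results: List[dict], domain: str) -> str:
--     """Format query results as a concise brief for Stage 2 injection.
--
--     Args:
--         results: Query results from query_indexes().
--         domain: Domain label for the header.
--
--     Returns:
--         Compact multi-line string summarizing available content.
--     """
--     if not results:
--         return f"No doc-intelligence content found for domain '{domain}'."
--
--     counts = Counter(r["_content_type"] for r in results)
--     lines = [f"doc-intelligence ({domain}): {len(results)} items"]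
--     for ct, n in sorted(counts.items()):
--         lines.append(f"  {ct}: {n}")
--     return "\n".join(lines)
-- ===== SOURCE B (Python) =====
-- def format_stage2_brief(results, domain):
--     """Sort-then-group: sort the content types once, then emit one line per
--     run of equal types in a single left-to-right scan (no Counter)."""
--     if not results:
--         return f"No doc-intelligence content found for domain '{domain}'."
--     types = sorted(r["_content_type"] for r in results)
--     lines = [f"doc-intelligence ({domain}): {len(results)} items"]
--     cur, cnt = types[0], 1
--     for t in types[1:]:
--         if t == cur:
--             cnt += 1
--         else:
--             lines.append(f"  {cur}: {cnt}")
--             cur, cnt = t, 1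
--     lines.append(f"  {cur}: {cnt}")
--     return "\n".join(lines)
-- ===== Notes on version B (the rewrite author's own statement) =====
-- stated objective: alternative
-- what changed: Replaces A's Counter-then-sort-the-items pass by sorting the raw content-type list once and emitting one line per run of equal adjacent types in a single accumulator scan (run-length grouping over a sorted list instead of hash counting).
import Mathlib
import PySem

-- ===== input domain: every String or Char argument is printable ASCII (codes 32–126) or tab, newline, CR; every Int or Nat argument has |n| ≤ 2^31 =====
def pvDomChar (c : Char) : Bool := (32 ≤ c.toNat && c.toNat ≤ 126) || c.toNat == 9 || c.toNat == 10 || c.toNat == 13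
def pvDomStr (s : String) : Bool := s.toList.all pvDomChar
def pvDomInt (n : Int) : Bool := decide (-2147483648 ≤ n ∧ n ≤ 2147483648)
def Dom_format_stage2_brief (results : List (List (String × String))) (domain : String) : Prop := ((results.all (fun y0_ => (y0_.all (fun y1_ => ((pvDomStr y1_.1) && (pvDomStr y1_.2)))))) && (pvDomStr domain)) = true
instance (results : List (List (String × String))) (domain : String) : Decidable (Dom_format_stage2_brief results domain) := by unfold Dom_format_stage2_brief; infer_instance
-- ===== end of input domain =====

-- B replaces A's Counter-then-sort-the-items pass by sorting the content-type list
-- once and emitting one line per run of equal adjacent types in a single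
-- accumulator scan (objective: alternative algorithm, same cost class).

-- r["_content_type"] (assoc-list lookup, first match); total via default, used only under Pre_
def pvCt (r : List (String × String)) : String :=
  ((r.find? (fun p => p.1 == "_content_type")).map Prod.snd).getD ""

-- ===== PORT A =====
def format_stage2_brief (results : List (List (String × String))) (domain : String) : String :=
  if results = [] then
    "No doc-intelligence content found for domain '" ++ domain ++ "'."
  else
    let counts := PySem.Dict.counter (results.map pvCt)
    let lines : List String :=
      ["doc-intelligence (" ++ domain ++ "): " ++ PySem.Int.toStr (results.length : Int) ++ " items"]
    let lines := (PySem.List.sorted2 counts.items Prod.fst Prod.snd false).foldl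
      (fun acc p => acc ++ ["  " ++ p.1 ++ ": " ++ PySem.Int.toStr p.2]) lines
    PySem.Str.join "\n" lines

-- ===== PORT B =====
-- the f-string for one per-type line
def pvBrLine (k : String) (n : Int) : String := "  " ++ k ++ ": " ++ PySem.Int.toStr n

-- the body of B's 'for t in types[1:]' loop; state = (lines, cur, cnt)
def pvBrStep (st : List String × String × Int) (t : String) : List String × String × Int :=
  if t == st.2.1 then (st.1, st.2.1, st.2.2 + 1)
  else (st.1 ++ [pvBrLine st.2.1 st.2.2], t, 1)

def format_stage2_brief_alt (results : List (List (String × String))) (domain : String) : String :=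
  if results = [] then
    "No doc-intelligence content found for domain '" ++ domain ++ "'."
  else
    let types := PySem.List.sorted (results.map pvCt) (fun x => x) false
    let header := "doc-intelligence (" ++ domain ++ "): " ++ PySem.Int.toStr (results.length : Int) ++ " items"
    -- cur, cnt = types[0], 1 (types[0]: total form, in range since results ≠ []); loop over types[1:]
    let st := (PySem.List.slice types (some 1) none).foldl pvBrStep
      ([header], PySem.List.pyGetD types 0 "", 1)
    PySem.Str.join "\n" (st.1 ++ [pvBrLine st.2.1 st.2.2])

-- ===== PRECONDITION & SPEC =====
-- Pre_ excludes exactly the inputs on which Python A raises KeyError: a result dict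
-- without the "_content_type" key.
def Pre_format_stage2_brief (results : List (List (String × String))) (domain : String) : Prop :=
  results.all (fun r => r.any (fun p => p.1 == "_content_type")) = true
instance (results : List (List (String × String))) (domain : String) : Decidable (Pre_format_stage2_brief results domain) := by unfold Pre_format_stage2_brief; infer_instance

def pvWitness_format_stage2_brief : (List (List (String × String))) × String :=
  ([[("_content_type", "note")], [("_content_type", "spec"), ("path", "a.md")]], "eng")

def Spec_format_stage2_brief (results : List (List (String × String))) (domain : String) (out : String) : Prop := out = format_stage2_brief_alt results domain
instance (results : List (List (String × String))) (domain : String) (out : String) : Decidable (Spec_format_stage2_brief results domain out) := by unfold Spec_format_stage2_brief; infer_instance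

-- ===== CLAIM (what is proved, stated in full; the proofs are below) =====
def Claim_equal_format_stage2_brief : Prop := ∀ (results : List (List (String × String))) (domain : String), Dom_format_stage2_brief results domain → Pre_format_stage2_brief results domain → Spec_format_stage2_brief results domain (format_stage2_brief results domain)

-- ===== LEMMAS AND PROOFS =====

-- ---- A side: the sorted Counter items are the sorted distinct keys with counts ----

-- the lexicographic "before" used by sorted2
def pvLexBefore {α κ₁ κ₂ : Type} [LinearOrder κ₁] [LinearOrder κ₂] (k1 : α → κ₁) (k2 : α → κ₂) : α → α → Bool :=
  fun a b => decide (k1 a < k1 b) || (!decide (k1 b < k1 a) && decide (k2 a < k2 b))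

theorem pvLexBefore_true_le {α κ₁ κ₂ : Type} [LinearOrder κ₁] [LinearOrder κ₂]
    (k1 : α → κ₁) (k2 : α → κ₂) {a b : α} (h : pvLexBefore k1 k2 a b = true) : k1 a ≤ k1 b := by
  unfold pvLexBefore at h
  simp only [Bool.or_eq_true, Bool.and_eq_true, Bool.not_eq_true', decide_eq_true_eq,
    decide_eq_false_iff_not] at h
  rcases h with h | ⟨h, _⟩
  · exact le_of_lt h
  · exact le_of_not_gt h

theorem pvLexBefore_false_ge {α κ₁ κ₂ : Type} [LinearOrder κ₁] [LinearOrder κ₂]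
    (k1 : α → κ₁) (k2 : α → κ₂) {a b : α} (h : pvLexBefore k1 k2 a b = false) : k1 b ≤ k1 a := by
  unfold pvLexBefore at h
  simp only [Bool.or_eq_false_iff, decide_eq_false_iff_not] at h
  exact le_of_not_gt h.1

theorem pvInsertBy_lex_pairwise {α κ₁ κ₂ : Type} [LinearOrder κ₁] [LinearOrder κ₂]
    (k1 : α → κ₁) (k2 : α → κ₂) (x : α) (ys : List α)
    (h : ys.Pairwise (fun a b => k1 a ≤ k1 b)) :
    (PySem.List.insertBy (pvLexBefore k1 k2) x ys).Pairwise (fun a b => k1 a ≤ k1 b) := by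
  induction ys with
  | nil => simp [PySem.List.insertBy]
  | cons y ys ih =>
    rw [List.pairwise_cons] at h
    by_cases hb : pvLexBefore k1 k2 x y = true
    · have hxy := pvLexBefore_true_le k1 k2 hb
      rw [show PySem.List.insertBy (pvLexBefore k1 k2) x (y :: ys) = x :: y :: ys by
        simp [PySem.List.insertBy, hb]]
      refine List.pairwise_cons.mpr ⟨?_, List.pairwise_cons.mpr ⟨h.1, h.2⟩⟩
      intro z hz
      rcases List.mem_cons.mp hz with rfl | hz
      · exact hxy
      · exact le_trans hxy (h.1 z hz)
    · have hb' : pvLexBefore k1 k2 x y = false := by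
        cases hxy : pvLexBefore k1 k2 x y
        · rfl
        · exact absurd hxy hb
      have hyx := pvLexBefore_false_ge k1 k2 hb'
      rw [show PySem.List.insertBy (pvLexBefore k1 k2) x (y :: ys) =
            y :: PySem.List.insertBy (pvLexBefore k1 k2) x ys by
        simp [PySem.List.insertBy, hb']]
      refine List.pairwise_cons.mpr ⟨?_, ih h.2⟩
      intro z hz
      rcases (PySem.List.insertBy_mem_iff _ _ _ _).mp hz with rfl | hz
      · exact hyx
      · exact h.1 z hz

theorem pvFoldl_insertBy_lex_pairwise {α κ₁ κ₂ : Type} [LinearOrder κ₁] [LinearOrder κ₂]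
    (k1 : α → κ₁) (k2 : α → κ₂) (xs acc : List α)
    (h : acc.Pairwise (fun a b => k1 a ≤ k1 b)) :
    (xs.foldl (fun acc x => PySem.List.insertBy (pvLexBefore k1 k2) x acc) acc).Pairwise
      (fun a b => k1 a ≤ k1 b) := by
  induction xs generalizing acc with
  | nil => exact h
  | cons x xs ih => exact ih _ (pvInsertBy_lex_pairwise k1 k2 x acc h)

theorem pvSorted2_eq_of_perm_of_pairwise_lt {α κ₁ κ₂ : Type} [LinearOrder κ₁] [LinearOrder κ₂]
    (xs ys : List α) (k1 : α → κ₁) (k2 : α → κ₂)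
    (hperm : ys.Perm xs) (hp : ys.Pairwise (fun a b => k1 a < k1 b)) :
    PySem.List.sorted2 xs k1 k2 false = ys := by
  have hdef : PySem.List.sorted2 xs k1 k2 false =
      xs.foldl (fun acc x => PySem.List.insertBy (pvLexBefore k1 k2) x acc) [] := rfl
  have hsperm : (PySem.List.sorted2 xs k1 k2 false).Perm xs := PySem.List.sorted2_perm xs k1 k2 false
  have hle : (PySem.List.sorted2 xs k1 k2 false).Pairwise (fun a b => k1 a ≤ k1 b) := by
    rw [hdef]; exact pvFoldl_insertBy_lex_pairwise k1 k2 xs [] (List.Pairwise.nil)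
  have hynd : (ys.map k1).Nodup := by
    rw [List.nodup_iff_pairwise_ne, List.pairwise_map]
    exact hp.imp (fun h => ne_of_lt h)
  have hsnd : ((PySem.List.sorted2 xs k1 k2 false).map k1).Nodup := ((hsperm.trans hperm.symm).map k1).nodup_iff.mpr hynd
  have hsne : (PySem.List.sorted2 xs k1 k2 false).Pairwise (fun a b => k1 a ≠ k1 b) := by
    rw [List.nodup_iff_pairwise_ne, List.pairwise_map] at hsnd
    exact hsnd
  have hslt : (PySem.List.sorted2 xs k1 k2 false).Pairwise (fun a b => k1 a < k1 b) := by
    have := hle.and hsne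
    exact this.imp (fun ⟨h1, h2⟩ => lt_of_le_of_ne h1 h2)
  exact List.Perm.eq_of_pairwise
    (fun a b _ _ hab hba => absurd (lt_trans hab hba) (lt_irrefl _))
    hslt hp (hsperm.trans hperm.symm)

theorem pvSortedItems (ks : List String) :
    PySem.List.sorted2 (PySem.Dict.counter ks).items Prod.fst Prod.snd false =
      (PySem.List.sorted (PySem.Set.ofList ks) (fun x => x) false).map
        (fun k => (k, (ks.count k : Int))) := by
  rw [PySem.Dict.items_counter]
  apply pvSorted2_eq_of_perm_of_pairwise_lt
  · exact (PySem.List.sorted_perm (PySem.Set.ofList ks) (fun x => x) false).map _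
  · rw [List.pairwise_map]
    exact PySem.List.sorted_ofList_pairwise_lt ks

-- ---- B side: the run-length scan over a sorted list ----

theorem pvOfList_sublist (xs : List String) : (PySem.Set.ofList xs).Sublist xs := by
  induction xs with
  | nil => simp [PySem.Set.ofList_nil]
  | cons x xs ih =>
    rw [PySem.Set.ofList_cons]
    refine List.Sublist.cons₂ x (List.Sublist.trans ?_ ih)
    simp [PySem.Set.discard]

-- the run-length fold over a sorted tail produces one line per distinct key, with its count
theorem pvRunFold (l : List String) (cur : String) (cnt : Int) (lines : List String)
    (hp : (cur :: l).Pairwise (fun a b : String => a ≤ b)) :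
    (l.foldl pvBrStep (lines, cur, cnt)).1 ++
      [pvBrLine (l.foldl pvBrStep (lines, cur, cnt)).2.1 (l.foldl pvBrStep (lines, cur, cnt)).2.2] =
    lines ++ (PySem.Set.ofList (cur :: l)).map
      (fun k => pvBrLine k (if k = cur then cnt + (l.count k : Int) else (l.count k : Int))) := by
  induction l generalizing cur cnt lines with
  | nil =>
    simp [PySem.Set.ofList_cons, PySem.Set.ofList_nil, PySem.Set.discard]
  | cons t l' ih =>
    by_cases ht : t = cur
    · subst ht
      have hp' : (t :: l').Pairwise (fun a b : String => a ≤ b) := (List.pairwise_cons.mp hp).2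
      have hstep : pvBrStep (lines, t, cnt) t = (lines, t, cnt + 1) := by
        simp [pvBrStep]
      rw [List.foldl_cons, hstep, ih t (cnt + 1) lines hp']
      have hset : PySem.Set.ofList (t :: t :: l') = PySem.Set.ofList (t :: l') := by
        simp [PySem.Set.ofList_cons, PySem.Set.discard, List.filter_filter]
      rw [hset]
      congr 1
      apply List.map_congr_left
      intro k _
      by_cases hk : k = t
      · subst hk
        simp only [List.count_cons_self]
        congr 1
        push_cast
        ring
      · have ht' : ¬ t = k := fun hh => hk hh.symm
        simp [hk, ht']
    · have h1 : ∀ x ∈ t :: l', cur ≤ x := (List.pairwise_cons.mp hp).1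
      have hp2 : (t :: l').Pairwise (fun a b : String => a ≤ b) := (List.pairwise_cons.mp hp).2
      have h2 : ∀ x ∈ l', t ≤ x := (List.pairwise_cons.mp hp2).1
      have hcur : cur ∉ t :: l' := by
        intro hmem
        rcases List.mem_cons.mp hmem with h | h
        · exact ht h.symm
        · exact ht (le_antisymm (h2 cur h) (h1 t List.mem_cons_self))
      have hstep : pvBrStep (lines, cur, cnt) t = (lines ++ [pvBrLine cur cnt], t, 1) := by
        simp [pvBrStep, ht]
      rw [List.foldl_cons, hstep, ih t 1 (lines ++ [pvBrLine cur cnt]) hp2]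
      have hset : PySem.Set.ofList (cur :: t :: l') = cur :: PySem.Set.ofList (t :: l') := by
        rw [PySem.Set.ofList_cons]
        congr 1
        have hne : ∀ x ∈ PySem.Set.ofList (t :: l'), ¬ x = cur := by
          intro x hx hxe
          exact hcur (hxe ▸ ((PySem.Set.mem_ofList (t :: l') x).mp hx))
        simp only [PySem.Set.discard]
        apply List.filter_eq_self.mpr
        intro a ha
        simpa using hne a ha
      rw [hset, List.map_cons, List.append_assoc, List.singleton_append]
      congr 1
      have hcount0 : ((t :: l').count cur : Int) = 0 := by
        simp [List.count_eq_zero.mpr hcur]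
      rw [if_pos rfl, hcount0, add_zero]
      congr 1
      apply List.map_congr_left
      intro k hk
      have hkmem : k ∈ t :: l' := (PySem.Set.mem_ofList (t :: l') k).mp hk
      have hkne : ¬ k = cur := fun h => hcur (h ▸ hkmem)
      rw [if_neg hkne]
      by_cases hkt : k = t
      · subst hkt
        simp only [List.count_cons_self]
        congr 1
        push_cast
        ring
      · have ht' : ¬ t = k := fun hh => hkt hh.symm
        simp [hkt, ht']

-- sorted(set(ks)) is set(sorted(ks)): the distinct keys in sorted order
theorem pvBridge (ks : List String) :
    PySem.List.sorted (PySem.Set.ofList ks) (fun x => x) false =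
      PySem.Set.ofList (PySem.List.sorted ks (fun x => x) false) := by
  apply PySem.List.sorted_id_eq_of_perm_of_pairwise
  · apply (List.perm_ext_iff_of_nodup (PySem.Set.nodup_ofList _) (PySem.Set.nodup_ofList _)).mpr
    intro x
    simp [PySem.Set.mem_ofList, PySem.List.mem_sorted]
  · exact List.Pairwise.sublist (pvOfList_sublist _) (PySem.List.sorted_pairwise ks (fun x => x))

-- ===== VERDICT (by name: the statement is the Claim_ definition above) =====
theorem format_stage2_brief_spec : Claim_equal_format_stage2_brief := by
  intro results domain _ _
  unfold Spec_format_stage2_brief format_stage2_brief format_stage2_brief_alt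
  by_cases h : results = []
  · simp [h]
  · simp only [h, if_false]
    set ks := results.map pvCt with hks
    have hksne : ks ≠ [] := by simp [hks, h]
    have hsne : PySem.List.sorted ks (fun x => x) false ≠ [] := by
      rw [Ne, PySem.List.sorted_eq_nil_iff]; exact hksne
    obtain ⟨t0, rest, hs⟩ := List.exists_cons_of_ne_nil hsne
    have hp : (t0 :: rest).Pairwise (fun a b : String => a ≤ b) := by
      rw [← hs]; exact PySem.List.sorted_pairwise ks (fun x => x)
    rw [pvSortedItems, PySem.List.foldl_append_singleton_eq_map, List.map_map, hs,
      PySem.List.slice_from_one, PySem.List.pyGetD_zero_cons]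
    simp only [List.tail_cons]
    rw [pvRunFold rest t0 1 _ hp]
    congr 1
    rw [pvBridge ks, hs]
    congr 1
    apply List.map_congr_left
    intro k hk
    have hcnt : (ks.count k : Int) = if k = t0 then 1 + (rest.count k : Int) else (rest.count k : Int) := by
      have hck : ks.count k = (t0 :: rest).count k :=
        (List.Perm.count_eq (by rw [← hs]; exact PySem.List.sorted_perm ks (fun x => x) false) k) |>.symm
      rw [hck]
      by_cases hkt : k = t0
      · subst hkt
        simp only [List.count_cons_self]
        congr 1
        push_cast
        ring
      · have ht' : ¬ t0 = k := fun hh => hkt hh.symm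
        simp [hkt, ht']
    simp only [Function.comp]
    rw [hcnt]
    rfl
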